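-- pv_equiv track=rewrite | github.com/Xinglab/GTEx-brain-sQTL | 14_RBP_binding_analysis/04_DeepBind_on_all_SNP_all_RBP/rbp_map_functions.py | return_seq_log_list
-- ===== SOURCE A (Python) =====
-- def return_seq_log_list(motif_info):
--     motif_pos = []
--     motif = motif_info.split('_')[-1]
--     rbp = motif_info.split('_')[0]
--     flag = False
--     for x in  motif:
--         if x == '[':
--             motif_pos.append([])
--             flag = True
--             continue
--         if x == ']':
--             flag = False
--             continue
--         if flag:
--             motif_pos[-1].append(x)
--         else:
--             motif_pos.append([x])
--     all_pos_seq = []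
--     seq_list = generate_seq_list(motif_pos)
--     return seq_list, rbp
--
-- def generate_seq_list(motif_pos):
--     if len(motif_pos) == 1:
--         return motif_pos[0]
--     else:
--         seq_list = []
--         for motif in motif_pos[0]:
--             for seq in generate_seq_list(motif_pos[1:]):
--                 seq_list.append(motif + seq)
--         return seq_list
-- ===== SOURCE B (Python) =====
-- def return_seq_log_list(motif_info):
--     parts = motif_info.split('_')
--     motif = parts[-1]
--     rbp = parts[0]
--     groups = []
--     flag = False
--     for x in motif:
--         if x == '[':
--             groups.append([])
--             flag = True
--         elif x == ']':
--             flag = False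
--         elif flag:
--             groups[-1].append(x)
--         else:
--             groups.append([x])
--     acc = list(groups[0])
--     for group in groups[1:]:
--         acc = [prefix + ch for prefix in acc for ch in group]
--     return acc, rbp
-- ===== Notes on version B (the rewrite author's own statement) =====
-- stated objective: faster
-- what changed: The recursive generate_seq_list (which re-slices motif_pos[1:] and recomputes the whole suffix product for every character of the first group) is replaced by a single left-to-right fold that extends an accumulator of prefixes by one character group at a time, with no recursion and no list slicing.
import Mathlib
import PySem

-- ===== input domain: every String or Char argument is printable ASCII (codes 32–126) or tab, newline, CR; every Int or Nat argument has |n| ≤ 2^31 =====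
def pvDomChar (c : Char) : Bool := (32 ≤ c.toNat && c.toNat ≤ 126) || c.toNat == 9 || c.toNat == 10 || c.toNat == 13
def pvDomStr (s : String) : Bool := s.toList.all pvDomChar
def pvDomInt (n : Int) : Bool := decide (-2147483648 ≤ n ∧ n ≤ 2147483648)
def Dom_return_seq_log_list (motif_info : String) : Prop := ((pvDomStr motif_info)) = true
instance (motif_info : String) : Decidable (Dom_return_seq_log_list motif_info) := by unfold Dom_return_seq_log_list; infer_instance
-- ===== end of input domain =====

-- B replaces A's recursive, re-slicing generate_seq_list by one accumulator fold over the
-- character groups (same return value; equivalence is about the return value only).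

-- ===== PORT A =====
-- motif_pos[-1].append(x): append x to the last group (the parse loop only reaches it when
-- a '[' has already appended a group, so the list is never empty there)
def pvPushLast (x : Char) : List (List Char) → List (List Char)
  | [] => []
  | [g] => [g ++ [x]]
  | g :: g' :: gs => g :: pvPushLast x (g' :: gs)

-- the 'for x in motif' parse loop of A (state: motif_pos, flag)
def pvParseA : List Char → Bool → List (List Char) → List (List Char)
  | [], _, acc => acc
  | x :: xs, flag, acc =>
    if x = '[' then pvParseA xs true (acc ++ [[]])
    else if x = ']' then pvParseA xs false acc
    else if flag then pvParseA xs flag (pvPushLast x acc)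
    else pvParseA xs flag (acc ++ [[x]])

-- generate_seq_list; on [] the Python raises IndexError (excluded by Pre_)
def pvGenA : List (List Char) → List (List Char)
  | [] => []
  | [g] => g.map (fun c => [c])
  | g :: h :: t =>
    g.foldl (fun seq_list m =>
      (pvGenA (h :: t)).foldl (fun sl s => sl ++ [m :: s]) seq_list) []

def return_seq_log_list (motif_info : String) : List String × String :=
  let parts := PySem.Chars.splitOn motif_info.toList ['_']
  let motif := parts.getLastD []      -- parts[-1]; split never returns an empty list
  let rbp := parts.headD []           -- parts[0]
  let motif_pos := pvParseA motif false []
  ((pvGenA motif_pos).map String.mk, String.mk rbp)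

-- ===== PORT B =====
-- B's parse loop, written as a fold over the characters with a (groups, flag) state
def pvParseB (motif : List Char) : List (List Char) :=
  (motif.foldl (fun (st : List (List Char) × Bool) x =>
      if x = '[' then (st.1 ++ [[]], true)
      else if x = ']' then (st.1, false)
      else if st.2 then (pvPushLast x st.1, st.2)
      else (st.1 ++ [[x]], st.2)) ([], false)).1

-- acc = list(groups[0]); for group in groups[1:]: acc = [p + c for p in acc for c in group]
def pvGenB (groups : List (List Char)) : List (List Char) :=
  groups.tail.foldl
    (fun acc g => acc.flatMap (fun p => g.map (fun c => p ++ [c])))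
    ((groups.headD []).map (fun c => [c]))

def return_seq_log_list_alt (motif_info : String) : List String × String :=
  let parts := PySem.Chars.splitOn motif_info.toList ['_']
  ((pvGenB (pvParseB (parts.getLastD []))).map String.mk, String.mk (parts.headD []))

-- ===== PRECONDITION & SPEC =====
-- Pre_ excludes exactly the inputs where the parsed group list is empty (the last '_'-chunk
-- has no character other than ']'): there A's generate_seq_list raises IndexError (and so does B).
def Pre_return_seq_log_list (motif_info : String) : Prop :=
  ((PySem.Chars.splitOn motif_info.toList ['_']).getLastD []).any (fun c => c ≠ ']') = true
instance (motif_info : String) : Decidable (Pre_return_seq_log_list motif_info) := by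
  unfold Pre_return_seq_log_list; infer_instance

def pvWitness_return_seq_log_list : String := "RBP1_a[cg]t"

def Spec_return_seq_log_list (motif_info : String) (out : List String × String) : Prop := out = return_seq_log_list_alt motif_info
instance (motif_info : String) (out : List String × String) : Decidable (Spec_return_seq_log_list motif_info out) := by unfold Spec_return_seq_log_list; infer_instance

-- ===== CLAIM (what is proved, stated in full; the proofs are below) =====
def Claim_equal_return_seq_log_list : Prop := ∀ (motif_info : String), Dom_return_seq_log_list motif_info → Pre_return_seq_log_list motif_info → Spec_return_seq_log_list motif_info (return_seq_log_list motif_info)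

-- ===== LEMMAS AND PROOFS =====

-- full cartesian product of the groups (proof-side characterisation; [] ↦ [[]])
def pvGenAll : List (List Char) → List (List Char)
  | [] => [[]]
  | g :: rest => g.flatMap (fun c => (pvGenAll rest).map (fun s => c :: s))

theorem parseA_eq_parseB (cs : List Char) (flag : Bool) (acc : List (List Char)) :
    pvParseA cs flag acc =
      (cs.foldl (fun (st : List (List Char) × Bool) x =>
        if x = '[' then (st.1 ++ [[]], true)
        else if x = ']' then (st.1, false)
        else if st.2 then (pvPushLast x st.1, st.2)
        else (st.1 ++ [[x]], st.2)) (acc, flag)).1 := by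
  induction cs generalizing flag acc with
  | nil => simp [pvParseA]
  | cons x xs ih =>
    simp only [pvParseA, List.foldl_cons]
    split_ifs <;> simp [ih]

theorem genA_eq_genAll : ∀ (g : List Char) (rest : List (List Char)),
    pvGenA (g :: rest) = pvGenAll (g :: rest) := by
  intro g rest
  induction rest generalizing g with
  | nil =>
    simp only [pvGenA, pvGenAll, List.flatMap]
    induction g with
    | nil => rfl
    | cons c cs ihc => simpa using ihc
  | cons h t ih =>
    show pvGenA (g :: h :: t) = _
    rw [pvGenA]
    rw [ih h]
    have inner : ∀ (m : Char) (sl : List (List Char)) (L : List (List Char)),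
        L.foldl (fun sl2 s => sl2 ++ [m :: s]) sl = sl ++ L.map (fun s => m :: s) := by
      intro m sl L
      induction L generalizing sl with
      | nil => simp
      | cons a as ihL => simp [ihL]
    have outer : ∀ (G : List Char) (sl : List (List Char)),
        G.foldl (fun seq_list m =>
            (pvGenAll (h :: t)).foldl (fun sl2 s => sl2 ++ [m :: s]) seq_list) sl
          = sl ++ G.flatMap (fun m => (pvGenAll (h :: t)).map (fun s => m :: s)) := by
      intro G
      induction G with
      | nil => simp
      | cons a as ihG => intro sl; simp [inner, List.flatMap_def]
    rw [outer g []]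
    simp [pvGenAll]

theorem genB_fold (gs : List (List Char)) (acc : List (List Char)) :
    gs.foldl (fun acc g => acc.flatMap (fun p => g.map (fun c => p ++ [c]))) acc
      = acc.flatMap (fun p => (pvGenAll gs).map (fun s => p ++ s)) := by
  induction gs generalizing acc with
  | nil => simp [pvGenAll]
  | cons g t ih =>
    simp only [List.foldl_cons, ih, pvGenAll]
    simp [List.flatMap_assoc, List.map_flatMap, List.flatMap_map,
          List.append_assoc, Function.comp_def]

theorem genA_eq_genB (gs : List (List Char)) : pvGenA gs = pvGenB gs := by
  cases gs with
  | nil => simp [pvGenA, pvGenB]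
  | cons g t =>
    rw [genA_eq_genAll]
    unfold pvGenB
    rw [genB_fold]
    simp [pvGenAll, List.flatMap_map]

-- ===== VERDICT (by name: the statement is the Claim_ definition above) =====
theorem return_seq_log_list_spec : Claim_equal_return_seq_log_list := by
  intro motif_info _ _
  unfold Spec_return_seq_log_list return_seq_log_list return_seq_log_list_alt
  simp only [parseA_eq_parseB, genA_eq_genB, pvParseB]
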